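-- pv_equiv track=rewrite | github.com/Mastro1/Africa_Maize_Modelling | HarvestStatAfrica/DataAvailability.py | define_country
-- ===== SOURCE A (Python) =====
-- def define_country(file_name):
--     """
--     Extract country name from the file name.
--
--     Args:
--         file_name (str): Name of the file to analyze
--
--     Returns:
--         str: Country name (handles multi-word countries for EVI/results files)
--     """
--     # Check if this is a file from EVI/results (VI, NDWI, ERA5 data)
--     if any(indicator in file_name for indicator in ["_VI_", "_NDWI_", "_ERA5_"]):
--         # For EVI/results files, extract country name up to admin level
--         parts = file_name.split("_")
--         country_parts = []
--
--         for i, part in enumerate(parts):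
--             if part.startswith("admin"):
--                 break
--             country_parts.append(part)
--
--         return "_".join(country_parts).replace("_", " ")
--     else:
--         # For other files (merged_data, remote_sensing_data, etc.), use original logic
--         return file_name.split("_")[0]
-- ===== SOURCE B (Python) =====
-- def define_country(file_name):
--     """
--     Extract country name from the file name.
--
--     Simpler: no token splitting at all for EVI/results files — the first token
--     that starts with "admin" is either the whole filename's start or is preceded
--     by an underscore, so cut the raw string at the first "_admin" occurrence and
--     turn underscores into spaces in one string-level pass.
--     """
--     if any(ind in file_name for ind in ("_VI_", "_NDWI_", "_ERA5_")):
--         if file_name.startswith("admin"):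
--             return ""
--         i = file_name.find("_admin")
--         head = file_name if i < 0 else file_name[:i]
--         return head.replace("_", " ")
--     return file_name.partition("_")[0]
-- ===== Notes on version B (the rewrite author's own statement) =====
-- stated objective: simpler
-- what changed: For EVI/results files B does not split the name into tokens at all: instead of A's accumulate-until-admin loop over split('_') followed by join and replace, B cuts the raw string at the first '_admin' occurrence (empty result when the name itself starts with 'admin') and replaces underscores by spaces in one string-level pass; the non-EVI branch uses partition('_') instead of split('_')[0].
import Mathlib
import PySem

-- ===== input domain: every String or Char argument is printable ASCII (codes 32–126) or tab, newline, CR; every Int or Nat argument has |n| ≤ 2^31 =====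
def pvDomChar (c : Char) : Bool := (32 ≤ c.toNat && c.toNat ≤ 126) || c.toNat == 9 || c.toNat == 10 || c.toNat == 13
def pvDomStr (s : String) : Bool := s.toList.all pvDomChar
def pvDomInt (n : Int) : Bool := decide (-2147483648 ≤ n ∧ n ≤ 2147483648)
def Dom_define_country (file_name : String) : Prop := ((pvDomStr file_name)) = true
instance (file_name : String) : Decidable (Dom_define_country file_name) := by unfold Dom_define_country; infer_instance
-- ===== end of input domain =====

-- B never splits the EVI filename into tokens: it cuts the raw string at the first
-- "_admin" occurrence (or returns "" when the name itself starts with "admin") and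
-- maps underscores to spaces in one string-level replace (simpler).

-- ===== PORT A =====
-- A's 'for part in parts: if part.startswith("admin"): break; country_parts.append(part)'
def pvBreakLoop (country_parts : List String) (parts : List String) : List String :=
  match parts with
  | [] => country_parts
  | p :: rest =>
    if PySem.Str.startswith p "admin" then country_parts
    else pvBreakLoop (country_parts ++ [p]) rest

def define_country (file_name : String) : String :=
  if ["_VI_", "_NDWI_", "_ERA5_"].any (fun indicator => PySem.Str.isIn indicator file_name) then
    -- sep "_" is nonempty, so split? is always 'some'
    let parts := (PySem.Str.split? file_name "_").getD []
    PySem.Str.replace (PySem.Str.join "_" (pvBreakLoop [] parts)) "_" " "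
  else
    -- split never returns an empty list, so Python's [0] cannot raise
    (PySem.List.pyGet? ((PySem.Str.split? file_name "_").getD []) 0).getD ""

-- ===== PORT B =====
def define_country_alt (file_name : String) : String :=
  if ["_VI_", "_NDWI_", "_ERA5_"].any (fun indicator => PySem.Str.isIn indicator file_name) then
    if PySem.Str.startswith file_name "admin" then ""
    else
      let i := PySem.Str.find file_name "_admin"
      let head := if i < 0 then file_name else PySem.Str.slice file_name none (some i)
      PySem.Str.replace head "_" " "
  else
    -- hand port of file_name.partition("_")[0]: the prefix before the first "_"
    -- (the whole string when "_" is absent) — exact for this use of partition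
    let j := PySem.Str.find file_name "_"
    if j < 0 then file_name else PySem.Str.slice file_name none (some j)

-- ===== PRECONDITION & SPEC =====
def Spec_define_country (file_name : String) (out : String) : Prop := out = define_country_alt file_name
instance (file_name : String) (out : String) : Decidable (Spec_define_country file_name out) := by unfold Spec_define_country; infer_instance

-- ===== CLAIM (what is proved, stated in full; the proofs are below) =====
def Claim_equal_define_country : Prop := ∀ (file_name : String), Dom_define_country file_name → Spec_define_country file_name (define_country file_name)

-- ===== LEMMAS AND PROOFS =====

-- A's break loop collects exactly the prefix of non-admin parts.
theorem pvBreakLoop_eq (acc l : List String) :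
    pvBreakLoop acc l = acc ++ l.takeWhile (fun p => !PySem.Str.startswith p "admin") := by
  induction l generalizing acc with
  | nil => simp [pvBreakLoop]
  | cons p rest ih =>
    cases h : PySem.Str.startswith p "admin" with
    | true =>
      simp only [pvBreakLoop, List.takeWhile_cons, h, Bool.not_true, if_true,
        Bool.false_eq_true, if_false, List.append_nil]
    | false =>
      simp only [pvBreakLoop, List.takeWhile_cons, h, Bool.not_false, if_true,
        Bool.false_eq_true, if_false, ih]
      simp

-- PySem's splitOn on the one-character separator '_' is Mathlib's List.splitOn.
theorem pvSplitOnGo_spec (l : List Char) (fuel : Nat) (cur : List Char) (acc : List (List Char))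
    (h : l.length ≤ fuel) :
    PySem.Chars.splitOn.go ['_'] fuel l cur acc
      = acc.reverse ++ (List.splitOn '_' l).modifyHead (cur.reverse ++ ·) := by
  induction l generalizing fuel cur acc with
  | nil =>
    cases fuel <;> simp [PySem.Chars.splitOn.go, List.splitOn_nil, List.modifyHead]
  | cons c rest ih =>
    cases fuel with
    | zero => simp at h
    | succ fuel =>
      rw [PySem.Chars.splitOn.go.eq_def]
      simp only []
      by_cases hc : c = '_'
      · subst hc
        have hpre : List.isPrefixOf ['_'] ('_' :: rest) = true := by
          simp [List.isPrefixOf]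
        simp only [hpre, if_true, List.length_cons, List.length_nil, List.drop_succ_cons,
          List.drop_zero, Nat.zero_add]
        rw [ih fuel [] _ (by simpa using h)]
        simp only [List.splitOn, List.splitOnP_cons, beq_self_eq_true, if_true,
          List.reverse_nil, List.modifyHead, List.reverse_cons, List.append_assoc,
          List.singleton_append, List.nil_append]
        cases hh : List.splitOnP (fun x => x == '_') rest with
        | nil => simp
        | cons hd tl => simp
      · have hpre : List.isPrefixOf ['_'] (c :: rest) = false := by
          simp [List.isPrefixOf]
          exact fun hh => hc hh.symm
        simp only [hpre, Bool.false_eq_true, if_false]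
        rw [ih fuel (c :: cur) acc (by simpa using Nat.le_of_succ_le_succ h)]
        have hne := List.splitOnP_ne_nil (fun x => x == '_') rest
        cases hh : List.splitOnP (fun x => x == '_') rest with
        | nil => exact absurd hh hne
        | cons hd tl =>
          simp [List.splitOn, List.splitOnP_cons, hc, hh, List.modifyHead]

theorem pvSplitOn_eq (l : List Char) :
    PySem.Chars.splitOn l ['_'] = List.splitOn '_' l := by
  unfold PySem.Chars.splitOn
  rw [pvSplitOnGo_spec l (l.length + 1) [] [] (Nat.le_succ _)]
  cases hh : List.splitOn '_' l with
  | nil => simp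
  | cons hd tl => simp

-- the Str-level split on "_" in terms of List.splitOn
theorem pvStrSplit (s : String) :
    (PySem.Str.split? s "_").getD [] = (List.splitOn '_' s.toList).map String.ofList := by
  have h := PySem.Str.split?_map s "_"
  have hsep : ("_" : String).toList = ['_'] := rfl
  rw [hsep] at h
  simp only [PySem.Chars.split?, List.isEmpty_cons, Bool.false_eq_true, if_false,
    pvSplitOn_eq] at h
  cases hh : PySem.Str.split? s "_" with
  | none => rw [hh] at h; simp at h
  | some ps =>
    rw [hh] at h
    simp only [Option.map_some, Option.some.injEq] at h
    simp only [Option.getD_some]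
    rw [← h, List.map_map]
    have : (String.ofList ∘ String.toList) = id := by
      funext t; simp
    simp [this]

-- splitOn of a string with no separator
theorem pvSplitOn_of_not_mem (l : List Char) (h : '_' ∉ l) : List.splitOn '_' l = [l] := by
  induction l with
  | nil => simp
  | cons c t ih =>
    simp only [List.mem_cons, not_or] at h
    have := ih h.2
    simp only [List.splitOn, List.splitOnP_cons] at *
    simp only [show (c == '_') = false by simpa using fun hh => h.1 hh.symm,
      Bool.false_eq_true, if_false]
    cases hh : List.splitOnP (fun x => x == '_') t with
    | nil => exact absurd hh (List.splitOnP_ne_nil _ t)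
    | cons a b => rw [hh] at this; simp at this; simp [this]

-- splitOn of a token-decomposed string
theorem pvSplitOn_append (t r : List Char) (h : '_' ∉ t) :
    List.splitOn '_' (t ++ '_' :: r) = t :: List.splitOn '_' r := by
  induction t with
  | nil => simp [List.splitOn, List.splitOnP_cons]
  | cons c u ih =>
    simp only [List.mem_cons, not_or] at h
    have := ih h.2
    simp only [List.cons_append, List.splitOn, List.splitOnP_cons] at *
    simp only [show (c == '_') = false by simpa using fun hh => h.1 hh.symm,
      Bool.false_eq_true, if_false]
    cases hh : List.splitOnP (fun x => x == '_') (u ++ '_' :: r) with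
    | nil => exact absurd hh (List.splitOnP_ne_nil _ _)
    | cons a b => rw [hh] at this; simp at this; simp [this.1, this.2]

theorem pvDropMid (t r : List Char) (j : Nat) :
    (t ++ '_' :: r).drop (t.length + 1 + j) = r.drop j := by
  induction t with
  | nil => simp [Nat.add_comm]
  | cons c u ih =>
    have : (c :: u).length + 1 + j = (u.length + 1 + j) + 1 := by simp; omega
    rw [this, List.cons_append, List.drop_succ_cons, ih]

theorem pvTakeMid (t r : List Char) (k : Nat) :
    (t ++ '_' :: r).take (t.length + 1 + k) = t ++ '_' :: r.take k := by
  induction t with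
  | nil => simp [Nat.add_comm, List.take_succ_cons]
  | cons c u ih =>
    have : (c :: u).length + 1 + k = (u.length + 1 + k) + 1 := by simp; omega
    rw [this, List.cons_append, List.take_succ_cons, ih, List.cons_append]

theorem pvNoOccBefore (t r xs : List Char) (ht : '_' ∉ t) (i : Nat) (hi : i < t.length) :
    ¬ ('_' :: xs) <+: (t ++ '_' :: r).drop i := by
  intro hp
  obtain ⟨s, hs⟩ := hp
  have hd : ((t ++ '_' :: r).drop i)[0]? = some '_' := by rw [← hs]; rfl
  rw [List.getElem?_drop, List.getElem?_append_left (by omega)] at hd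
  simp only [Nat.add_zero] at hd
  exact ht (List.mem_of_getElem? hd)

-- find is pinned by an occurrence with none before it
theorem pvFind_eq_of (l sub : List Char) (k : Nat) (hk : sub <+: l.drop k)
    (hmin : ∀ i < k, ¬ sub <+: l.drop i) : PySem.Chars.find l sub = (k : Int) := by
  have hin : PySem.Chars.isIn sub l = true :=
    (PySem.Chars.exists_prefix_drop_iff_isIn sub l).mp ⟨k, hk⟩
  have hnn : 0 ≤ PySem.Chars.find l sub :=
    (PySem.Chars.find_nonneg_iff l sub).mpr ((PySem.Chars.isIn_iff_infix sub l).mp hin)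
  obtain ⟨hpre, hm⟩ := PySem.Chars.find_spec (s := l) (sub := sub) hnn
  have : (PySem.Chars.find l sub).toNat = k := by
    rcases Nat.lt_trichotomy (PySem.Chars.find l sub).toNat k with h | h | h
    · exact absurd hpre (hmin _ h)
    · exact h
    · exact absurd hk (hm k h)
  omega

-- a pattern starting with '_' is absent from an underscore-free string
theorem pvFind_none (l xs : List Char) (h : '_' ∉ l) :
    PySem.Chars.find l ('_' :: xs) = -1 := by
  rw [PySem.Chars.find_eq_neg_one_iff]
  intro hinf
  exact h (hinf.sublist.subset (by simp))

theorem pvInfix_iff (sub s : List Char) : sub <:+: s ↔ ∃ j, sub <+: s.drop j := by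
  constructor
  · intro hi
    exact (PySem.Chars.exists_prefix_drop_iff_isIn sub s).mpr ((PySem.Chars.isIn_iff_infix sub s).mpr hi)
  · rintro ⟨j, hj⟩
    exact hj.isInfix.trans (List.drop_suffix j s).isInfix

theorem pvFind_decomp (t r xs : List Char) (ht : '_' ∉ t) :
    PySem.Chars.find (t ++ '_' :: r) ('_' :: xs) =
      if PySem.Chars.startswith r xs then (t.length : Int)
      else if PySem.Chars.find r ('_' :: xs) = -1 then -1
      else (t.length : Int) + 1 + PySem.Chars.find r ('_' :: xs) := by
  by_cases hs : PySem.Chars.startswith r xs = true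
  · rw [if_pos hs]
    apply pvFind_eq_of
    · rw [List.drop_left]
      exact List.cons_prefix_cons.mpr ⟨rfl, (PySem.Chars.startswith_iff r xs).mp hs⟩
    · exact fun i hi => pvNoOccBefore t r xs ht i hi
  · rw [if_neg hs]
    by_cases hf : PySem.Chars.find r ('_' :: xs) = -1
    · rw [if_pos hf]
      rw [PySem.Chars.find_eq_neg_one_iff] at hf ⊢
      intro hinf
      obtain ⟨j, hj⟩ := (pvInfix_iff _ _).mp hinf
      rcases Nat.lt_trichotomy j t.length with h | h | h
      · exact pvNoOccBefore t r xs ht j h hj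
      · subst h
        rw [List.drop_left] at hj
        exact hs ((PySem.Chars.startswith_iff r xs).mpr (List.cons_prefix_cons.mp hj).2)
      · obtain ⟨j', rfl⟩ : ∃ j', j = t.length + 1 + j' := ⟨j - t.length - 1, by omega⟩
        rw [pvDropMid] at hj
        exact hf ((pvInfix_iff _ _).mpr ⟨j', hj⟩)
    · rw [if_neg hf]
      have hnn : 0 ≤ PySem.Chars.find r ('_' :: xs) := by
        have := PySem.Chars.neg_one_le_find (s := r) (sub := '_' :: xs)
        omega
      obtain ⟨hpre, hmin⟩ := PySem.Chars.find_spec (s := r) (sub := '_' :: xs) hnn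
      have hres := pvFind_eq_of (t ++ '_' :: r) ('_' :: xs)
          (t.length + 1 + (PySem.Chars.find r ('_' :: xs)).toNat)
          (by rw [pvDropMid]; exact hpre)
          (by
            intro i hi
            rcases Nat.lt_trichotomy i t.length with h | h | h
            · exact pvNoOccBefore t r xs ht i h
            · subst h
              rw [List.drop_left]
              intro hp
              exact hs ((PySem.Chars.startswith_iff r xs).mpr (List.cons_prefix_cons.mp hp).2)
            · obtain ⟨j', rfl⟩ : ∃ j', i = t.length + 1 + j' := ⟨i - t.length - 1, by omega⟩
              rw [pvDropMid]
              exact hmin j' (by omega))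
      rw [hres]
      push_cast
      omega

-- decomposition of a string containing '_' into first token / separator / rest
theorem pvDecomp (l : List Char) (hm : '_' ∈ l) :
    ∃ t r, l = t ++ '_' :: r ∧ '_' ∉ t ∧ t = l.takeWhile (fun c => !(c == '_')) := by
  set p : Char → Bool := fun c => !(c == '_') with hp
  set t := l.takeWhile p with htdef
  have hnt : '_' ∉ t := by
    intro h
    have := List.mem_takeWhile_imp h
    simp [hp] at this
  have hne : l.dropWhile p ≠ [] := by
    intro h
    have := List.takeWhile_append_dropWhile (p := p) (l := l)
    rw [h, List.append_nil] at this
    rw [← this] at hm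
    exact hnt hm
  have hhead : (l.dropWhile p).head hne = '_' := by
    have := List.head_dropWhile_not p hne
    simp [hp] at this
    exact this
  refine ⟨t, (l.dropWhile p).tail, ?_, hnt, rfl⟩
  conv_lhs => rw [← List.takeWhile_append_dropWhile (p := p) (l := l)]
  rw [htdef]
  congr 1
  rw [← hhead]
  exact (List.cons_head_tail hne).symm

-- a prefix without '_' lies entirely in the first token
theorem pvAdminPrefix (t r xs : List Char) (hxs : '_' ∉ xs) :
    xs <+: (t ++ '_' :: r) ↔ xs <+: t := by
  constructor
  · intro hp
    by_cases hlen : xs.length ≤ t.length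
    · exact List.prefix_of_prefix_length_le hp (List.prefix_append t _) hlen
    · exfalso
      obtain ⟨s, hs⟩ := hp
      have hget : (t ++ '_' :: r)[t.length]? = some '_' := by simp
      rw [← hs] at hget
      have hlt : t.length < xs.length := by omega
      rw [List.getElem?_append_left (by simpa using hlt)] at hget
      exact hxs (List.mem_of_getElem? hget)
  · intro hp
    exact hp.trans (List.prefix_append t _)

theorem pvStartApp (t r xs : List Char) (hxs : '_' ∉ xs) :
    PySem.Chars.startswith (t ++ '_' :: r) xs = PySem.Chars.startswith t xs := by
  have hiff := pvAdminPrefix t r xs hxs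
  cases h1 : PySem.Chars.startswith (t ++ '_' :: r) xs <;>
    cases h2 : PySem.Chars.startswith t xs <;> try rfl
  · exact absurd ((PySem.Chars.startswith_iff _ _).mpr
      (hiff.mpr ((PySem.Chars.startswith_iff _ _).mp h2))) (by simp [h1])
  · exact absurd ((PySem.Chars.startswith_iff _ _).mpr
      (hiff.mp ((PySem.Chars.startswith_iff _ _).mp h1))) (by simp [h2])

theorem pvJoin_cons (a b : List Char) (l : List (List Char)) :
    PySem.Chars.join ['_'] (a :: b :: l) = a ++ '_' :: PySem.Chars.join ['_'] (b :: l) := by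
  rw [PySem.Chars.join_cons_cons]
  simp

theorem pvSplitOn_ne_nil (l : List Char) : List.splitOn '_' l ≠ [] := by
  simp only [List.splitOn]
  exact List.splitOnP_ne_nil _ _

-- the first token decides whether the whole string starts with "admin"
theorem pvStartTok (l : List Char) :
    PySem.Chars.startswith l "admin".toList
      = PySem.Chars.startswith ((List.splitOn '_' l).headI) "admin".toList := by
  by_cases hm : '_' ∈ l
  · obtain ⟨t, r, rfl, hnt, -⟩ := pvDecomp l hm
    rw [pvSplitOn_append t r hnt, pvStartApp t r _ (by decide)]
    rfl
  · rw [pvSplitOn_of_not_mem l hm]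
    rfl

-- the main EVI-branch fact: A's join of the kept tokens is B's cut of the raw string
theorem pvEviAux (n : Nat) : ∀ l : List Char, l.length ≤ n →
    PySem.Chars.join ['_']
        ((List.splitOn '_' l).takeWhile (fun p => !PySem.Chars.startswith p "admin".toList))
      = if PySem.Chars.startswith l "admin".toList then []
        else if PySem.Chars.find l ('_' :: "admin".toList) = -1 then l
        else l.take (PySem.Chars.find l ('_' :: "admin".toList)).toNat := by
  induction n with
  | zero =>
    intro l hl
    have : l = [] := List.length_eq_zero_iff.mp (Nat.le_zero.mp hl)
    subst this
    decide
  | succ n ih =>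
    intro l hl
    by_cases hm : '_' ∈ l
    · obtain ⟨t, r, rfl, hnt, -⟩ := pvDecomp l hm
      rw [pvSplitOn_append t r hnt, pvStartApp t r _ (by decide)]
      cases h2 : PySem.Chars.startswith t "admin".toList
      · -- first token kept
        rw [List.takeWhile_cons_of_pos
          (by show (!PySem.Chars.startswith t "admin".toList) = true; rw [h2]; rfl)]
        rw [if_neg (by decide), pvFind_decomp t r "admin".toList hnt]
        have hrlen : r.length ≤ n := by
          have := hl
          simp only [List.length_append, List.length_cons] at this
          omega
        have hIH := ih r hrlen
        obtain ⟨h0, rest, hsp⟩ : ∃ h0 rest, List.splitOn '_' r = h0 :: rest := by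
          cases hh : List.splitOn '_' r with
          | nil => exact absurd hh (pvSplitOn_ne_nil r)
          | cons a b => exact ⟨a, b, rfl⟩
        cases h3 : PySem.Chars.startswith r "admin".toList
        · -- r's first token is kept too, so A's kept list stays nonempty
          have h4 : PySem.Chars.startswith h0 "admin".toList = false := by
            have := pvStartTok r
            rw [hsp, h3] at this
            exact this.symm
          have h3' : ¬ (PySem.Chars.startswith r "admin".toList = true) := by
            rw [h3]; exact Bool.false_ne_true
          rw [hsp, List.takeWhile_cons_of_pos
            (by show (!PySem.Chars.startswith h0 "admin".toList) = true; rw [h4]; rfl), pvJoin_cons]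
          rw [hsp, List.takeWhile_cons_of_pos
            (by show (!PySem.Chars.startswith h0 "admin".toList) = true; rw [h4]; rfl),
            if_neg h3'] at hIH
          rw [hIH]
          simp only [Bool.false_eq_true, if_false]
          by_cases h5 : PySem.Chars.find r ('_' :: "admin".toList) = -1
          · rw [if_pos h5, if_pos h5]; simp
          · have hnn : 0 ≤ PySem.Chars.find r ('_' :: "admin".toList) := by
              have := PySem.Chars.neg_one_le_find (s := r) (sub := '_' :: "admin".toList)
              omega
            rw [if_neg h5, if_neg h5, if_neg (by omega :
              ¬ ((t.length : Int) + 1 + PySem.Chars.find r ('_' :: "admin".toList) = -1))]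
            have harith : ((t.length : Int) + 1 + PySem.Chars.find r ('_' :: "admin".toList)).toNat
                = t.length + 1 + (PySem.Chars.find r ('_' :: "admin".toList)).toNat := by omega
            rw [harith, pvTakeMid]
        · -- r starts with "admin": A keeps exactly [t], B cuts at position |t|
          have h4 : PySem.Chars.startswith h0 "admin".toList = true := by
            have := pvStartTok r
            rw [hsp, h3] at this
            exact this.symm
          rw [hsp, List.takeWhile_cons_of_neg
            (by show ¬ ((!PySem.Chars.startswith h0 "admin".toList) = true); rw [h4]; decide),
            PySem.Chars.join_singleton]
          rw [if_pos (rfl : true = true),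
            if_neg (show ¬ ((t.length : Int) = -1) by omega)]
          have : ((t.length : Int)).toNat = t.length := by omega
          rw [this]
          exact (List.take_left (l₁ := t) (l₂ := '_' :: r)).symm
      · -- first token (hence the whole name) starts with "admin": both sides empty
        rw [List.takeWhile_cons_of_neg
          (by show ¬ ((!PySem.Chars.startswith t "admin".toList) = true); rw [h2]; decide),
          PySem.Chars.join_nil, if_pos rfl]
    · -- no separator in the name at all
      rw [pvSplitOn_of_not_mem l hm]
      cases h2 : PySem.Chars.startswith l "admin".toList
      · rw [List.takeWhile_cons_of_pos
          (by show (!PySem.Chars.startswith l "admin".toList) = true; rw [h2]; rfl),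
          List.takeWhile_nil, PySem.Chars.join_singleton,
          if_neg (by decide), if_pos (pvFind_none l _ hm)]
      · rw [List.takeWhile_cons_of_neg
          (by show ¬ ((!PySem.Chars.startswith l "admin".toList) = true); rw [h2]; decide),
          PySem.Chars.join_nil, if_pos rfl]

-- the else-branch fact: the first token is the cut before the first '_'
theorem pvPartMain (l : List Char) :
    (List.splitOn '_' l).headI
      = if PySem.Chars.find l ['_'] = -1 then l
        else l.take (PySem.Chars.find l ['_']).toNat := by
  by_cases hm : '_' ∈ l
  · obtain ⟨t, r, rfl, hnt, -⟩ := pvDecomp l hm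
    have hf : PySem.Chars.find (t ++ '_' :: r) ['_'] = (t.length : Int) := by
      have := pvFind_decomp t r [] hnt
      rwa [if_pos ((PySem.Chars.startswith_iff r []).mpr (List.nil_prefix))] at this
    rw [pvSplitOn_append t r hnt, hf, if_neg (by omega)]
    have : ((t.length : Int)).toNat = t.length := by omega
    rw [this]
    exact (List.take_left (l₁ := t) (l₂ := '_' :: r)).symm
  · rw [pvSplitOn_of_not_mem l hm, if_pos (pvFind_none l [] hm)]
    rfl

theorem pvEviMain (l : List Char) :
    PySem.Chars.join ['_']
        ((List.splitOn '_' l).takeWhile (fun p => !PySem.Chars.startswith p "admin".toList))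
      = if PySem.Chars.startswith l "admin".toList then []
        else if PySem.Chars.find l ('_' :: "admin".toList) = -1 then l
        else l.take (PySem.Chars.find l ('_' :: "admin".toList)).toNat :=
  pvEviAux l.length l (le_refl _)

-- ===== VERDICT (by name: the statement is the Claim_ definition above) =====
theorem define_country_spec : Claim_equal_define_country := by
  intro s _
  unfold Spec_define_country define_country define_country_alt
  by_cases hg : (["_VI_", "_NDWI_", "_ERA5_"].any (fun indicator => PySem.Str.isIn indicator s)) = true
  · simp only [hg, if_true]
    -- A's kept-token join equals B's raw cut; then both apply the same replace
    have hparts : (PySem.Str.split? s "_").getD [] = (List.splitOn '_' s.toList).map String.ofList :=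
      pvStrSplit s
    have hA : (PySem.Str.join "_" (pvBreakLoop [] ((PySem.Str.split? s "_").getD []))).toList
        = PySem.Chars.join ['_']
            ((List.splitOn '_' s.toList).takeWhile (fun p => !PySem.Chars.startswith p "admin".toList)) := by
      rw [PySem.Str.toList_join, pvBreakLoop_eq, hparts, List.nil_append, List.takeWhile_map,
        List.map_map]
      have hpred : ((fun p => !PySem.Str.startswith p "admin") ∘ String.ofList)
          = fun cp => !PySem.Chars.startswith cp "admin".toList := by
        funext cp
        simp [PySem.Str.startswith_eq]
      have hcomp : (String.toList ∘ String.ofList) = id := by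
        funext t; simp
      rw [hpred, hcomp, List.map_id]
      rfl
    by_cases hb : PySem.Str.startswith s "admin" = true
    · rw [if_pos hb]
      have hbc : PySem.Chars.startswith s.toList "admin".toList = true := by
        rw [← PySem.Str.startswith_eq]; exact hb
      have hmain := pvEviMain s.toList
      rw [if_pos hbc] at hmain
      apply String.toList_inj.mp
      rw [PySem.Str.toList_replace, hA, hmain]
      rfl
    · rw [if_neg hb]
      have hbc : PySem.Chars.startswith s.toList "admin".toList = false := by
        cases hx : PySem.Chars.startswith s.toList "admin".toList
        · rfl
        · exact absurd (by rw [← PySem.Str.startswith_eq] at hx; exact hx) hb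
      have hmain := pvEviMain s.toList
      rw [if_neg (by rw [hbc]; exact Bool.false_ne_true)] at hmain
      have hfind : PySem.Str.find s "_admin" = PySem.Chars.find s.toList ('_' :: "admin".toList) := by
        rw [PySem.Str.find_eq]; rfl
      congr 1
      apply String.toList_inj.mp
      rw [hA, hmain]
      have hge : -1 ≤ PySem.Chars.find s.toList ('_' :: "admin".toList) :=
        PySem.Chars.neg_one_le_find (s := s.toList) (sub := '_' :: "admin".toList)
      by_cases hf : PySem.Chars.find s.toList ('_' :: "admin".toList) = -1
      · rw [if_pos hf, if_pos (by rw [hfind]; omega)]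
      · rw [if_neg hf, if_neg (by rw [hfind]; omega)]
        rw [PySem.Str.toList_slice, PySem.Chars.slice_eq_listSlice,
          PySem.List.slice_to _ (by rw [hfind]; omega), hfind]
  · simp only [hg, Bool.false_eq_true, if_false]
    obtain ⟨h0, rest, hsp⟩ : ∃ h0 rest, List.splitOn '_' s.toList = h0 :: rest := by
      cases hh : List.splitOn '_' s.toList with
      | nil => exact absurd hh (pvSplitOn_ne_nil s.toList)
      | cons a b => exact ⟨a, b, rfl⟩
    have hA : (PySem.List.pyGet? ((PySem.Str.split? s "_").getD []) 0).getD "" = String.ofList h0 := by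
      rw [pvStrSplit, hsp]
      simp [PySem.List.pyGet?, PySem.List.pyIdx?]
    have hpm := pvPartMain s.toList
    rw [hsp] at hpm
    simp only [List.headI] at hpm
    have hfind : PySem.Str.find s "_" = PySem.Chars.find s.toList ['_'] := by
      rw [PySem.Str.find_eq]; rfl
    have hge : -1 ≤ PySem.Chars.find s.toList ['_'] :=
      PySem.Chars.neg_one_le_find (s := s.toList) (sub := ['_'])
    rw [hA]
    apply String.toList_inj.mp
    by_cases hf : PySem.Chars.find s.toList ['_'] = -1
    · rw [if_pos hf] at hpm
      rw [if_pos (by rw [hfind]; omega)]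
      simp [hpm]
    · rw [if_neg hf] at hpm
      rw [if_neg (by rw [hfind]; omega)]
      rw [PySem.Str.toList_slice, PySem.Chars.slice_eq_listSlice,
        PySem.List.slice_to _ (by rw [hfind]; omega), hfind]
      simp [hpm]
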